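-- pv_equiv track=rewrite | github.com/jakebrouwer/Code_Examples | Example_Code/example_code.py | find_dna_motif
-- ===== SOURCE A (Python) =====
-- def find_dna_motif(dna:str,motif:str):
--     """
--     Solves Rosalind problem ID: SUBS
--
--     Given two strings s and t, t is a substring of s if t is contained as a contiguous collection of symbols in s (as a result, t must be no longer than s).
--     The position of a symbol in a string is the total number of symbols found to its left, including itself
--     (e.g., the positions of all occurrences of 'U' in "AUGCUUCAGAAAGGUCUUACG" are 2, 5, 6, 15, 17, and 18). The symbol at position i of s is denoted by s[i].
--
--     A substring of s can be represented as s[j:k], where j and k represent the starting and ending positions of the substring in s;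
--     for example, if s = "AUGCUUCAGAAAGGUCUUACG", then s[2:5] = "UGCU".
--
--     The location of a substring s[j:k] is its beginning position j;
--     note that t will have multiple locations in s if it occurs more than once as a substring of s (see the Sample below).
--
--     Given: Two DNA strings s and t (each of length at most 1 kbp).
--
--     Return: All locations of t as a substring of s.
--
--     Sample Dataset
--     dna = GATATATGCATATACTT
--     motif = ATAT
--     Sample Output
--     2 4 10
--
--     Args:
--         dna (str): The string of dna to test the motif against
--         motif (str): a pattern to find in the dna
--     Returns:
--         list: A list of the indexes where the start of each motif was found
--     """
--     indexes = []
--     done=False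
--     idx=0
--     while done == False:
--         idx = dna.find(motif,idx)
--         if idx != -1:
--             indexes.append(idx)
--         else:
--             done=True
--         idx+=1
--     return indexes
-- ===== SOURCE B (Python) =====
-- def find_dna_motif(dna: str, motif: str):
--     m = len(motif)
--     indexes = []
--     for i in range(len(dna) - m + 1):
--         if dna[i:i + m] == motif:
--             indexes.append(i)
--     return indexes
-- ===== Notes on version B (the rewrite author's own statement) =====
-- stated objective: idiomatic
-- what changed: Replaces the stateful while-loop around str.find (with a done flag and manual index bumping) by a direct scan of every candidate start position comparing the slice against the motif.
import Mathlib
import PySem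

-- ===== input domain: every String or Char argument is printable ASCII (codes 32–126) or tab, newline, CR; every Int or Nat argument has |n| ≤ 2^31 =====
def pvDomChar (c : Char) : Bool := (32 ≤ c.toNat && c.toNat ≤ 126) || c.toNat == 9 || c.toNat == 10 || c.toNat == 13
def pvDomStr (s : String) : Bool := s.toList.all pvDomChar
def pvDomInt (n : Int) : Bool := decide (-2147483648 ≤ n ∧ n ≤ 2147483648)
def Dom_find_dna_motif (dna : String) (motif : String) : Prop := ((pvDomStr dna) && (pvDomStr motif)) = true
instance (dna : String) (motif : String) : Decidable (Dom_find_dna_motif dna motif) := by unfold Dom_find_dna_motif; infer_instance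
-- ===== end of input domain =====

-- B replaces A's stateful while-loop around str.find by an idiomatic direct scan
-- of every candidate start, comparing the slice against the motif (same values, not faster).


-- ===== PORT A =====
-- A's while-loop: idx = dna.find(motif, idx); append and bump, or stop at -1.
-- fuel only makes the loop total; dna.length + 2 always suffices (proved below).
def findLoopA (dna : String) (motif : String) : Nat → Int → List Int → List Int
  | 0, _, acc => acc
  | fuel + 1, idx, acc =>
    let r := PySem.Str.findFrom dna motif idx none
    if r ≠ -1 then findLoopA dna motif fuel (r + 1) (acc ++ [r])
    else acc

def find_dna_motif (dna : String) (motif : String) : List Int :=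
  findLoopA dna motif (dna.toList.length + 2) 0 []

-- ===== PORT B =====
-- B: for i in range(len(dna) - m + 1): if dna[i:i+m] == motif: indexes.append(i)
def find_dna_motif_alt (dna : String) (motif : String) : List Int :=
  let m : Int := PySem.Str.len motif
  (PySem.List.pyRange 0 (PySem.Str.len dna - m + 1) 1).foldl
    (fun acc i => if PySem.Str.slice dna (some i) (some (i + m)) = motif then acc ++ [i] else acc) []

-- ===== PRECONDITION & SPEC =====
def Spec_find_dna_motif (dna : String) (motif : String) (out : List Int) : Prop := out = find_dna_motif_alt dna motif
instance (dna : String) (motif : String) (out : List Int) : Decidable (Spec_find_dna_motif dna motif out) := by unfold Spec_find_dna_motif; infer_instance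

-- ===== CLAIM (what is proved, stated in full; the proofs are below) =====
def Claim_equal_find_dna_motif : Prop := ∀ (dna : String) (motif : String), Dom_find_dna_motif dna motif → Spec_find_dna_motif dna motif (find_dna_motif dna motif)

-- ===== LEMMAS AND PROOFS =====

-- the reference value: all match positions in [k, N) with N := (len(dna) - len(motif) + 1).toNat
def occsFrom (cs ms : List Char) (k : Nat) : List Int :=
  ((List.range' k (((cs.length : Int) - ms.length + 1).toNat - k)).filter
    (fun i => decide (ms <+: cs.drop i))).map (Nat.cast : Nat → Int)

theorem occsFrom_nil_of_le {cs ms : List Char} {k : Nat}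
    (h : ((cs.length : Int) - ms.length + 1).toNat ≤ k) : occsFrom cs ms k = [] := by
  unfold occsFrom
  rw [Nat.sub_eq_zero_of_le h]
  simp

-- every match position at or below the end is < N
theorem lt_N_of_prefix {cs ms : List Char} {i : Nat} (hi : i ≤ cs.length)
    (h : ms <+: cs.drop i) : i < ((cs.length : Int) - ms.length + 1).toNat := by
  have hlen := h.length_le
  simp only [List.length_drop] at hlen
  omega

-- findFrom past the end is -1 (CPython rule, by computation on the definition)
theorem findFrom_of_len_lt (cs ms : List Char) (k : Nat) (h : cs.length < k) :
    PySem.Chars.findFrom cs ms (k : Int) none = -1 := by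
  simp only [PySem.Chars.findFrom]
  have h1 : ¬ ((k : Int) < 0) := by omega
  have h2 : (cs.length : Int) < (k : Int) := by exact_mod_cast h
  simp [h1, h2]

-- a prefix at position i ≥ k is an infix of cs.drop k
theorem infix_of_prefix_drop {cs ms : List Char} {i k : Nat} (hk : k ≤ i)
    (h : ms <+: cs.drop i) : ms <:+: cs.drop k := by
  refine List.infix_iff_prefix_suffix.mpr ⟨cs.drop i, h, ?_⟩
  have : cs.drop i = (cs.drop k).drop (i - k) := by
    rw [List.drop_drop]; congr 1; omega
  rw [this]; exact List.drop_suffix _ _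

theorem occsFrom_nil_of_no_match {cs ms : List Char} {k : Nat}
    (h : ∀ i, k ≤ i → ¬ ms <+: cs.drop i) : occsFrom cs ms k = [] := by
  unfold occsFrom
  have hf : (List.range' k (((cs.length : Int) - ms.length + 1).toNat - k)).filter
      (fun i => decide (ms <+: cs.drop i)) = [] := by
    rw [List.filter_eq_nil_iff]
    intro i hi
    have : k ≤ i := (List.mem_range'_1.mp hi).1
    simp [h i this]
  rw [hf]
  simp

-- the invariant of A's loop
theorem findLoopA_spec (dna motif : String) :
    ∀ (fuel k : Nat) (acc : List Int),
      ((dna.toList.length : Int) - motif.toList.length + 1).toNat + 1 ≤ fuel + k →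
      k ≤ dna.toList.length + 1 →
      findLoopA dna motif fuel (k : Int) acc = acc ++ occsFrom dna.toList motif.toList k := by
  intro fuel
  induction fuel with
  | zero =>
    intro k acc hfuel hk
    rw [occsFrom_nil_of_le (by omega)]
    simp [findLoopA]
  | succ fuel ih =>
    intro k acc hfuel hk
    set cs := dna.toList with hcs
    set ms := motif.toList with hms
    by_cases hkL : k ≤ cs.length
    · simp only [findLoopA, PySem.Str.findFrom_eq, ← hcs, ← hms]
      by_cases hr : PySem.Chars.findFrom cs ms (k : Int) none = -1
      · simp only [hr, ne_eq, not_true_eq_false, if_false]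
        have hninf := (PySem.Chars.findFrom_natCast_eq_neg_one_iff cs ms k hkL).mp hr
        rw [occsFrom_nil_of_no_match, List.append_nil]
        intro i hi hpre
        exact hninf (infix_of_prefix_drop hi hpre)
      · simp only [ne_eq, hr, not_false_eq_true, if_true]
        obtain ⟨hkr, hpre, hmin⟩ := PySem.Chars.findFrom_natCast_spec cs ms k hkL hr
        set r := PySem.Chars.findFrom cs ms (k : Int) none with hrdef
        clear_value r
        have hr0 : (0 : Int) ≤ r := le_trans (by exact_mod_cast Nat.zero_le k) hkr
        have hrn : r = ((r.toNat : Nat) : Int) := by omega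
        have hkrn : k ≤ r.toNat := by omega
        have hrL : r.toNat ≤ cs.length := by
          by_contra hc
          push Not at hc
          have hnil : cs.drop r.toNat = [] := List.drop_eq_nil_of_le (by omega)
          rw [hnil] at hpre
          have hms0 : ms = [] := List.prefix_nil.mp hpre
          have : ¬ ms <+: cs.drop k := hmin k le_rfl (by omega)
          exact this (by simp [hms0])
        set N := (((cs.length : Nat) : Int) - ms.length + 1).toNat with hN
        have hrN : r.toNat < N := lt_N_of_prefix hrL hpre
        have hrec := ih (r.toNat + 1) (acc ++ [(r.toNat : Int)]) (by omega) (by omega)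
        rw [hrn]
        have hcast : ((r.toNat : Int) + 1) = (((r.toNat + 1 : Nat) : Nat) : Int) := by push_cast; ring
        rw [hcast, hrec]
        rw [List.append_assoc]
        congr 1
        -- occsFrom cs ms k = [r] ++ occsFrom cs ms (r.toNat + 1)
        unfold occsFrom
        rw [← hN]
        have hsplit : List.range' k (N - k) =
            List.range' k (r.toNat - k) ++ r.toNat :: List.range' (r.toNat + 1) (N - (r.toNat + 1)) := by
          have h1 : List.range' k (r.toNat - k) 1 ++ List.range' (k + 1 * (r.toNat - k)) (N - r.toNat) 1
              = List.range' k ((r.toNat - k) + (N - r.toNat)) 1 := List.range'_append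
          simp only [one_mul] at h1
          rw [show N - k = (r.toNat - k) + (N - r.toNat) from by omega, ← h1]
          congr 1
          rw [show k + (r.toNat - k) = r.toNat from by omega,
              show N - r.toNat = (N - (r.toNat + 1)) + 1 from by omega,
              List.range'_succ]
        rw [hsplit, List.filter_append, List.map_append]
        have hfilt1 : (List.range' k (r.toNat - k)).filter (fun i => decide (ms <+: cs.drop i)) = [] := by
          rw [List.filter_eq_nil_iff]
          intro i hi
          have hmem := List.mem_range'_1.mp hi
          simp only [decide_eq_true_eq]
          exact hmin i hmem.1 (by omega)
        rw [hfilt1, List.map_nil, List.nil_append]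
        rw [List.filter_cons_of_pos (by simp [hpre]), List.map_cons]
        rfl
    · -- k = cs.length + 1 : findFrom returns -1 by the past-the-end rule
      simp only [findLoopA, PySem.Str.findFrom_eq, ← hcs, ← hms]
      rw [findFrom_of_len_lt cs ms k (by omega)]
      simp only [ne_eq, not_true_eq_false, if_false]
      rw [occsFrom_nil_of_le (by omega), List.append_nil]

-- B equals the same reference value
theorem alt_eq_occs (dna motif : String) :
    find_dna_motif_alt dna motif = occsFrom dna.toList motif.toList 0 := by
  unfold find_dna_motif_alt
  rw [PySem.List.foldl_append_ite_eq_filter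
    (fun i => PySem.Str.slice dna (some i) (some (i + PySem.Str.len motif)) = motif)]
  rw [List.nil_append, PySem.List.pyRange_one, List.filter_map]
  unfold occsFrom
  rw [Nat.sub_zero, ← List.range_eq_range']
  have hlen : ∀ s : String, PySem.Str.len s = (s.toList.length : Int) := by
    intro s; simp
  simp only [hlen, zero_add, Int.sub_zero]
  refine congrArg (List.map _) ?_
  apply List.filter_congr
  intro i _
  simp only [Function.comp_apply, decide_eq_decide]
  have hslice : PySem.Str.slice dna (some (i : Int)) (some ((i : Int) + (motif.toList.length : Int)))
      = String.ofList ((dna.toList.drop i).take motif.toList.length) := by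
    simp [PySem.Str.slice, PySem.List.slice_natCast_add]
  rw [hslice]
  constructor
  · intro h
    have h' : (dna.toList.drop i).take motif.toList.length = motif.toList := by
      have := congrArg String.toList h
      simpa using this
    rw [← h']
    exact List.take_prefix _ _
  · intro h
    have h' := (List.prefix_iff_eq_take).mp h
    apply String.ext
    simpa using h'.symm

-- ===== VERDICT (by name: the statement is the Claim_ definition above) =====
theorem find_dna_motif_spec : Claim_equal_find_dna_motif := by
  intro dna motif _
  unfold Spec_find_dna_motif find_dna_motif
  rw [alt_eq_occs]
  have h := findLoopA_spec dna motif (dna.toList.length + 2) 0 [] (by omega) (by omega)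
  simp only [Nat.cast_zero] at h
  rw [h, List.nil_append]
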